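-- pv_equiv track=rewrite | github.com/fonol/anki-search-inside-add-card | src/web/html.py | pdf_prog_bar
-- ===== SOURCE A (Python) =====
-- def pdf_prog_bar(read, read_total):
--     if read is not None and read_total is not None:
--         perc = int(read * 10.0 / read_total)
--         perc_100 =  int(read * 100.0 / read_total)
--         prog_bar = str(perc_100) + " % &nbsp;"
--         for x in range(0, 10):
--             if x < perc:
--                 prog_bar = f"{prog_bar}<div class='siac-prog-sq-filled'></div>"
--             else:
--                 prog_bar = f"{prog_bar}<div class='siac-prog-sq'></div>"
--         return prog_bar
--     else:
--         return ""
-- ===== SOURCE B (Python) =====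
-- def pdf_prog_bar(read, read_total):
--     if read is None or read_total is None:
--         return ""
--     perc = int(read * 10.0 / read_total)
--     perc_100 = int(read * 100.0 / read_total)
--     filled = max(0, min(perc, 10))
--     return (str(perc_100) + " % &nbsp;"
--             + "<div class='siac-prog-sq-filled'></div>" * filled
--             + "<div class='siac-prog-sq'></div>" * (10 - filled))
-- ===== Notes on version B (the rewrite author's own statement) =====
-- stated objective: simpler
-- what changed: Replaced the per-square loop with a closed-form string: clamp perc to [0,10] and repeat the filled/empty square markup by multiplication.
-- outside the precondition, e.g. on pdf_prog_bar(1, 0): A raises ZeroDivisionError, B raises ZeroDivisionError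
import Mathlib
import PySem

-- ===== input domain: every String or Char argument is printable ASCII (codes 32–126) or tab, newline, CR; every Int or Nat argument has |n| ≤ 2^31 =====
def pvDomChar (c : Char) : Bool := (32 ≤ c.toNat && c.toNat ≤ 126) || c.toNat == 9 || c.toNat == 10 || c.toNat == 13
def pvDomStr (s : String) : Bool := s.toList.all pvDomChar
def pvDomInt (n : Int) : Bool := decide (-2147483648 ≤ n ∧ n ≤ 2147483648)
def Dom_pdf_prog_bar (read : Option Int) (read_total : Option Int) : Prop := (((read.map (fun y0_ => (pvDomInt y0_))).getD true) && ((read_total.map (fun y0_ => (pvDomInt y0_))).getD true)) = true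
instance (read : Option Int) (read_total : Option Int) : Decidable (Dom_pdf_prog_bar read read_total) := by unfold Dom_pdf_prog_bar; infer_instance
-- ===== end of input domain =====

-- B replaces A's per-square loop with a closed-form concatenation (clamped repetition); return value only.
-- In both ports int(read * k.0 / read_total) is ported as Int.tdiv (k*read) read_total: on |read| ≤ 2^31 the
-- numerator k*read (k = 10, 100) is far below 2^52, so the float division's rounding can never cross an
-- integer and int() of it equals exact truncating division.

-- ===== PORT A =====
def pdf_prog_bar (read : Option Int) (read_total : Option Int) : String :=
  match read, read_total with
  | some r, some t =>
      let perc : Int := Int.tdiv (r * 10) t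
      let perc_100 : Int := Int.tdiv (r * 100) t
      let prog_bar := PySem.Int.toStr perc_100 ++ " % &nbsp;"
      (PySem.List.pyRange 0 10 1).foldl (fun prog_bar x =>
        if x < perc then prog_bar ++ "<div class='siac-prog-sq-filled'></div>"
        else prog_bar ++ "<div class='siac-prog-sq'></div>") prog_bar
  | _, _ => ""

-- ===== PORT B =====
-- Python "s * n" for n : Int (negative gives "")
def pvRepeat (s : String) (n : Int) : String := String.join (List.replicate n.toNat s)

def pdf_prog_bar_alt (read : Option Int) (read_total : Option Int) : String :=
  match read, read_total with
  | none, _ => ""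
  | _, none => ""
  | some r, some t =>
      let perc : Int := Int.tdiv (r * 10) t
      let perc_100 : Int := Int.tdiv (r * 100) t
      let filled : Int := max 0 (min perc 10)
      PySem.Int.toStr perc_100 ++ " % &nbsp;"
        ++ pvRepeat "<div class='siac-prog-sq-filled'></div>" filled
        ++ pvRepeat "<div class='siac-prog-sq'></div>" (10 - filled)

-- ===== PRECONDITION & SPEC =====
-- excluded: both arguments present with read_total = 0, where A raises ZeroDivisionError
def Pre_pdf_prog_bar (read : Option Int) (read_total : Option Int) : Prop :=
  read = none ∨ read_total ≠ some 0
instance (read : Option Int) (read_total : Option Int) : Decidable (Pre_pdf_prog_bar read read_total) := by unfold Pre_pdf_prog_bar; infer_instance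
def pvWitness_pdf_prog_bar : Option Int × Option Int := (some 3, some 7)

def Spec_pdf_prog_bar (read : Option Int) (read_total : Option Int) (out : String) : Prop := out = pdf_prog_bar_alt read read_total
instance (read : Option Int) (read_total : Option Int) (out : String) : Decidable (Spec_pdf_prog_bar read read_total out) := by unfold Spec_pdf_prog_bar; infer_instance

-- ===== CLAIM (what is proved, stated in full; the proofs are below) =====
def Claim_equal_pdf_prog_bar : Prop := ∀ (read : Option Int) (read_total : Option Int), Dom_pdf_prog_bar read read_total → Pre_pdf_prog_bar read read_total → Spec_pdf_prog_bar read read_total (pdf_prog_bar read read_total)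

-- ===== LEMMAS AND PROOFS =====

-- the 10-step loop equals the clamped closed form, for ANY perc
theorem loop_eq_closed (perc : Int) (s : String) :
    (PySem.List.pyRange 0 10 1).foldl (fun prog_bar x =>
        if x < perc then prog_bar ++ "<div class='siac-prog-sq-filled'></div>"
        else prog_bar ++ "<div class='siac-prog-sq'></div>") s
    = s ++ (pvRepeat "<div class='siac-prog-sq-filled'></div>" (max 0 (min perc 10))
        ++ pvRepeat "<div class='siac-prog-sq'></div>" (10 - max 0 (min perc 10))) := by
  have hl : PySem.List.pyRange 0 10 1 = [0,1,2,3,4,5,6,7,8,9] := by decide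
  rw [hl]
  simp only [List.foldl]
  set c : Int := max 0 (min perc 10) with hc
  simp only [show (0:Int) < perc ↔ 0 < c from by omega,
    show (1:Int) < perc ↔ 1 < c from by omega, show (2:Int) < perc ↔ 2 < c from by omega,
    show (3:Int) < perc ↔ 3 < c from by omega, show (4:Int) < perc ↔ 4 < c from by omega,
    show (5:Int) < perc ↔ 5 < c from by omega, show (6:Int) < perc ↔ 6 < c from by omega,
    show (7:Int) < perc ↔ 7 < c from by omega, show (8:Int) < perc ↔ 8 < c from by omega,
    show (9:Int) < perc ↔ 9 < c from by omega]
  have hb1 : 0 ≤ c := by omega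
  have hb2 : c ≤ 10 := by omega
  clear hc
  clear_value c
  interval_cases c <;>
    simp [pvRepeat, String.join, String.append_assoc]

-- ===== VERDICT (by name: the statement is the Claim_ definition above) =====
theorem pdf_prog_bar_spec : Claim_equal_pdf_prog_bar := by
  intro read read_total _ hpre
  unfold Spec_pdf_prog_bar
  match read, read_total with
  | none, _ => rfl
  | some r, none => rfl
  | some r, some t =>
      simp only [pdf_prog_bar, pdf_prog_bar_alt]
      rw [loop_eq_closed]
      simp [String.append_assoc]
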